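-- pv_equiv track=rewrite | github.com/BrettRey/erdos-problem-993 | verify_route1_transfer_extremal_shapes_2026_02_19.py | subtree_height
-- ===== SOURCE A (Python) =====
-- def subtree_height(children: list[list[int]], root: int) -> int:
--     max_depth = 0
--     stack = [(root, 0)]
--     while stack:
--         v, d = stack.pop()
--         if not children[v]:
--             max_depth = max(max_depth, d)
--         for c in children[v]:
--             stack.append((c, d + 1))
--     return max_depth
-- ===== SOURCE B (Python) =====
-- def subtree_height(children: list[list[int]], root: int) -> int:
--     kids = children[root]
--     if not kids:
--         return 0
--     return 1 + max(subtree_height(children, c) for c in kids)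
-- ===== Notes on version B (the rewrite author's own statement) =====
-- stated objective: alternative
-- what changed: Replaces the explicit (node, depth) stack that tracks depths top-down and maximises over leaves with a structural recursion that computes each subtree's height bottom-up as 1 + max over children.
import Mathlib
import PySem

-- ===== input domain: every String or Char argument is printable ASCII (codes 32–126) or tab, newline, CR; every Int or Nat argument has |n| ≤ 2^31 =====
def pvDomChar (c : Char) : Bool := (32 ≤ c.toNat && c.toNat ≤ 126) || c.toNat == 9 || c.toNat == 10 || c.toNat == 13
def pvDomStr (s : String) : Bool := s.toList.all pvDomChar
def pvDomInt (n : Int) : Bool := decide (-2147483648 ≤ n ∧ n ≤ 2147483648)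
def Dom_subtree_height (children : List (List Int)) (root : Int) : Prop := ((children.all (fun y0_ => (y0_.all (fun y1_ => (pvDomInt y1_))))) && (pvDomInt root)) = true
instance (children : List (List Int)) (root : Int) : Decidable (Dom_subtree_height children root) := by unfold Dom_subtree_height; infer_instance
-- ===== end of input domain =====

-- B replaces A's explicit (node, depth) stack with a bottom-up structural recursion
-- (height = 0 at a leaf, else 1 + max of the children's heights); return values agree on Pre_.

-- children[v] (Python indexing); under Pre_ the index is always in range, so the default is never used
def pvKids (children : List (List Int)) (v : Int) : List Int :=
  (PySem.List.pyGet? children v).getD []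

-- ===== PORT A =====
-- A's while-stack loop; the stack head is Python's stack top (list end); the fuel is only a
-- totality guard — under Pre_ it is proved sufficient, so the loop always ends on an empty stack.
def pvLoopA (children : List (List Int)) : Nat → List (Int × Int) → Int → Int
  | _, [], md => md
  | 0, _, md => md
  | f+1, (v, d) :: rest, md =>
      let kids := pvKids children v
      let md' := if kids = [] then max md d else md
      pvLoopA children f ((kids.map (fun c => (c, d + 1))).reverse ++ rest) md'

-- fuel bound for A's loop: 1 + sum of the weights of the children (number of stack pops)
def pvW (children : List (List Int)) : Nat → Int → Nat
  | 0, _ => 1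
  | f+1, v => 1 + ((pvKids children v).map (fun c => pvW children f c)).sum

def subtree_height (children : List (List Int)) (root : Int) : Int :=
  pvLoopA children (pvW children children.length root) [(root, 0)] 0

-- ===== PORT B =====
-- B's recursion; fuel is a totality guard, children.length + 1 suffices under Pre_
def pvHeightB (children : List (List Int)) : Nat → Int → Int
  | 0, _ => 0
  | f+1, v =>
      let kids := pvKids children v
      if kids = [] then 0
      else 1 + ((PySem.List.max? (kids.map (fun c => pvHeightB children f c)) (fun y => y)).getD 0)

def subtree_height_alt (children : List (List Int)) (root : Int) : Int :=
  pvHeightB children (children.length + 1) root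

-- ===== PRECONDITION & SPEC =====
-- Python index normalisation (valid for -n ≤ v < n) and range predicate
def pvNorm (n : Nat) (v : Int) : Nat := (v + if v < 0 then (n : Int) else 0).toNat
def pvInR (n : Nat) (v : Int) : Prop := -(n : Int) ≤ v ∧ v < (n : Int)

-- the set of (normalised) nodes reachable from a node: iterate the one-step successor closure
def pvKidsF (children : List (List Int)) (u : Nat) : Finset Nat :=
  ((children.getD u []).map (pvNorm children.length)).toFinset
def pvStep (children : List (List Int)) (s : Finset Nat) : Finset Nat :=
  s ∪ s.biUnion (pvKidsF children)
def pvIter (children : List (List Int)) (u : Nat) : Nat → Finset Nat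
  | 0 => {u}
  | k+1 => pvStep children (pvIter children u k)
def pvDesc (children : List (List Int)) (u : Nat) : Finset Nat :=
  pvIter children u children.length
def pvReach (children : List (List Int)) (root : Int) : Finset Nat :=
  pvDesc children (pvNorm children.length root)

-- Pre_ excludes exactly the inputs on which A does not return: an out-of-range root or an
-- out-of-range child index of a reachable node (Python raises IndexError there), and a cycle
-- reachable from the root (A's loop never terminates). On every input A returns on, Pre_ holds.
def Pre_subtree_height (children : List (List Int)) (root : Int) : Prop :=
  pvInR children.length root ∧
  (∀ u ∈ pvReach children root, ∀ c ∈ children.getD u [], pvInR children.length c) ∧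
  (∀ u ∈ pvReach children root, ∀ c ∈ children.getD u [],
    u ∉ pvDesc children (pvNorm children.length c))

instance (children : List (List Int)) (root : Int) : Decidable (Pre_subtree_height children root) := by
  unfold Pre_subtree_height pvInR; infer_instance

def pvWitness_subtree_height : List (List Int) × Int := ([[2, -1], [2], []], 0)

def Spec_subtree_height (children : List (List Int)) (root : Int) (out : Int) : Prop := out = subtree_height_alt children root
instance (children : List (List Int)) (root : Int) (out : Int) : Decidable (Spec_subtree_height children root out) := by unfold Spec_subtree_height; infer_instance

-- ===== CLAIM (what is proved, stated in full; the proofs are below) =====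
def Claim_equal_subtree_height : Prop := ∀ (children : List (List Int)) (root : Int), Dom_subtree_height children root → Pre_subtree_height children root → Spec_subtree_height children root (subtree_height children root)

-- ===== LEMMAS AND PROOFS =====

-- height of B with the canonical fuel, weight of A with the canonical fuel
def pvHB (children : List (List Int)) (v : Int) : Int :=
  pvHeightB children (children.length + 1) v
def pvWB (children : List (List Int)) (v : Int) : Nat :=
  pvW children children.length v

-- what A's loop computes: fold the stack with max md (d + height v)
def pvG (children : List (List Int)) (md : Int) (stack : List (Int × Int)) : Int :=
  stack.foldl (fun m p => max m (p.2 + pvHB children p.1)) md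
def pvSW (children : List (List Int)) (stack : List (Int × Int)) : Nat :=
  (stack.map (fun p => pvWB children p.1)).sum

def pvClosed (children : List (List Int)) (T : Finset Nat) : Prop :=
  ∀ a ∈ T, pvKidsF children a ⊆ T

lemma pvKids_norm (children : List (List Int)) (v : Int)
    (hl : -(children.length : Int) ≤ v) (hr : v < (children.length : Int)) :
    pvKids children v = children.getD (pvNorm children.length v) [] := by
  by_cases hneg : v < 0
  · obtain ⟨k, rfl⟩ : ∃ k : Nat, v = -(k : Int) := ⟨(-v).toNat, by omega⟩
    have hk1 : 0 < k := by omega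
    have hk2 : k ≤ children.length := by omega
    have hidx : children.length - k < children.length := by omega
    have hsame : pvNorm children.length (-(k : Int)) = children.length - k := by
      unfold pvNorm; rw [if_pos hneg]; omega
    rw [pvKids, hsame, PySem.List.pyGet?_neg_natCast children k hk1 hk2,
      List.getD_eq_getElem children [] hidx, List.getElem?_eq_getElem hidx, Option.getD_some]
  · have h0 : 0 ≤ v := by omega
    have hidx : v.toNat < children.length := by omega
    have hsame : pvNorm children.length v = v.toNat := by
      unfold pvNorm; rw [if_neg hneg]; omega
    rw [pvKids, hsame, PySem.List.pyGet?_of_nonneg children h0,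
      List.getD_eq_getElem children [] hidx, List.getElem?_eq_getElem hidx, Option.getD_some]

lemma pvNorm_lt (n : Nat) (v : Int) (h : pvInR n v) : pvNorm n v < n := by
  obtain ⟨h1, h2⟩ := h; unfold pvNorm; split_ifs <;> omega

lemma pvStep_supset (children : List (List Int)) (s : Finset Nat) : s ⊆ pvStep children s :=
  Finset.subset_union_left

lemma pvIter_succ_supset (children : List (List Int)) (u : Nat) (k : Nat) :
    pvIter children u k ⊆ pvIter children u (k+1) :=
  pvStep_supset children _

lemma pvIter_mono (children : List (List Int)) (u : Nat) {k m : Nat} (h : k ≤ m) :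
    pvIter children u k ⊆ pvIter children u m := by
  induction h with
  | refl => exact Finset.Subset.refl _
  | step _ ih => exact ih.trans (pvIter_succ_supset children u _)

lemma pvMem_self_desc (children : List (List Int)) (u : Nat) : u ∈ pvDesc children u :=
  pvIter_mono children u (Nat.zero_le _) (Finset.mem_singleton_self u)

lemma pvIter_min (children : List (List Int)) (u : Nat) (T : Finset Nat)
    (hu : u ∈ T) (hT : pvClosed children T) : ∀ k, pvIter children u k ⊆ T := by
  intro k
  induction k with
  | zero => simpa [pvIter] using hu
  | succ k ih =>
    show pvStep children (pvIter children u k) ⊆ T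
    exact Finset.union_subset ih (Finset.biUnion_subset.mpr (fun a ha => hT a (ih ha)))

lemma pvIter_eq_propagate (children : List (List Int)) (u j : Nat)
    (h : pvIter children u j = pvIter children u (j+1)) :
    ∀ m, j ≤ m → pvIter children u m = pvIter children u j := by
  intro m hm
  induction hm with
  | refl => rfl
  | step _ ih =>
    show pvStep children (pvIter children u _) = _
    rw [ih]; exact h.symm

lemma pvIter_growth (children : List (List Int)) (u : Nat) :
    ∀ k, (∃ j ≤ k, pvIter children u j = pvIter children u (j+1)) ∨
      k + 1 ≤ (pvIter children u k).card := by
  intro k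
  induction k with
  | zero => right; simp [pvIter]
  | succ k ih =>
    rcases ih with ⟨j, hj, he⟩ | hc
    · exact Or.inl ⟨j, hj.trans (Nat.le_succ k), he⟩
    · by_cases he : pvIter children u k = pvIter children u (k+1)
      · exact Or.inl ⟨k, Nat.le_succ k, he⟩
      · right
        have hss : pvIter children u k ⊂ pvIter children u (k+1) :=
          Finset.ssubset_iff_subset_ne.mpr ⟨pvIter_succ_supset children u k, he⟩
        have := Finset.card_lt_card hss
        omega

lemma pvDesc_step_eq (children : List (List Int)) (u : Nat)
    (h : (pvDesc children u).card ≤ children.length) :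
    pvStep children (pvDesc children u) = pvDesc children u := by
  rcases pvIter_growth children u children.length with ⟨j, hj, he⟩ | hc
  · have h1 := pvIter_eq_propagate children u j he children.length hj
    have h2 := pvIter_eq_propagate children u j he (children.length + 1)
      (hj.trans (Nat.le_succ _))
    show pvIter children u (children.length + 1) = pvDesc children u
    rw [h2]; unfold pvDesc; rw [h1]
  · exact absurd hc (by unfold pvDesc at h; omega)

lemma pvDesc_closed (children : List (List Int)) (u : Nat)
    (h : (pvDesc children u).card ≤ children.length) :
    pvClosed children (pvDesc children u) := by
  intro a ha x hx
  rw [← pvDesc_step_eq children u h]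
  exact Finset.mem_union_right _ (Finset.mem_biUnion.mpr ⟨a, ha, hx⟩)

lemma pvReach_range (children : List (List Int)) (root : Int)
    (hPre : Pre_subtree_height children root) :
    ∀ k, k ≤ children.length →
      pvIter children (pvNorm children.length root) k ⊆ Finset.range children.length := by
  obtain ⟨hroot, hrange, _⟩ := hPre
  intro k
  induction k with
  | zero =>
    intro _
    simpa [pvIter] using Finset.mem_range.mpr (pvNorm_lt _ _ hroot)
  | succ k ih =>
    intro hk
    have ihk := ih (by omega)
    refine Finset.union_subset ihk (Finset.biUnion_subset.mpr ?_)
    intro a ha x hx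
    have hamem : a ∈ pvReach children root :=
      pvIter_mono children _ (by omega : k ≤ children.length) ha
    obtain ⟨c, hc, hcx⟩ := List.mem_toFinset.mp hx |> List.mem_map.mp
    rw [← hcx]
    exact Finset.mem_range.mpr (pvNorm_lt _ _ (hrange a hamem c hc))

lemma pvReach_card (children : List (List Int)) (root : Int)
    (hPre : Pre_subtree_height children root) :
    (pvReach children root).card ≤ children.length := by
  have h := pvReach_range children root hPre children.length (Nat.le_refl _)
  calc (pvReach children root).card ≤ (Finset.range children.length).card :=
        Finset.card_le_card h
    _ = children.length := Finset.card_range _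

lemma pvReach_closed (children : List (List Int)) (root : Int)
    (hPre : Pre_subtree_height children root) :
    pvClosed children (pvReach children root) :=
  pvDesc_closed children _ (pvReach_card children root hPre)

lemma pvDesc_sub_reach (children : List (List Int)) (root : Int)
    (hPre : Pre_subtree_height children root) (u : Nat)
    (hu : u ∈ pvReach children root) :
    pvDesc children u ⊆ pvReach children root :=
  pvIter_min children u _ hu (pvReach_closed children root hPre) children.length

lemma pvDesc_card_le (children : List (List Int)) (root : Int)
    (hPre : Pre_subtree_height children root) (u : Nat)
    (hu : u ∈ pvReach children root) :
    (pvDesc children u).card ≤ children.length := by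
  have h1 : pvDesc children u ⊆ pvReach children root := pvDesc_sub_reach children root hPre u hu
  have := Finset.card_le_card h1
  have := pvReach_card children root hPre
  omega

-- the one membership lemma the stability inductions use: a child of a reachable in-range node
-- is itself in range and reachable, and its descendant set is strictly smaller
lemma pvChild_facts (children : List (List Int)) (root : Int)
    (hPre : Pre_subtree_height children root) (v : Int)
    (hv : pvInR children.length v) (hr : pvNorm children.length v ∈ pvReach children root)
    (c : Int) (hc : c ∈ pvKids children v) :
    pvInR children.length c ∧ pvNorm children.length c ∈ pvReach children root ∧
      (pvDesc children (pvNorm children.length c)).card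
        < (pvDesc children (pvNorm children.length v)).card := by
  obtain ⟨hroot, hrange, hacyc⟩ := hPre
  rw [pvKids_norm children v hv.1 hv.2] at hc
  have hcInR : pvInR children.length c := hrange _ hr c hc
  have hcK : pvNorm children.length c ∈ pvKidsF children (pvNorm children.length v) :=
    List.mem_toFinset.mpr (List.mem_map.mpr ⟨c, hc, rfl⟩)
  have hcReach : pvNorm children.length c ∈ pvReach children root :=
    pvReach_closed children root ⟨hroot, hrange, hacyc⟩ _ hr hcK
  have hvdescClosed : pvClosed children (pvDesc children (pvNorm children.length v)) :=
    pvDesc_closed children _ (pvDesc_card_le children root ⟨hroot, hrange, hacyc⟩ _ hr)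
  have hcInVdesc : pvNorm children.length c ∈ pvDesc children (pvNorm children.length v) :=
    hvdescClosed _ (pvMem_self_desc children _) hcK
  have hsub : pvDesc children (pvNorm children.length c)
      ⊆ pvDesc children (pvNorm children.length v) :=
    pvIter_min children _ _ hcInVdesc hvdescClosed children.length
  have hnotin : pvNorm children.length v ∉ pvDesc children (pvNorm children.length c) :=
    hacyc _ hr c hc
  refine ⟨hcInR, hcReach, Finset.card_lt_card ?_⟩
  rw [Finset.ssubset_def]
  exact ⟨hsub, fun h => hnotin (h (pvMem_self_desc children _))⟩

lemma pvDesc_card_pos (children : List (List Int)) (u : Nat) :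
    1 ≤ (pvDesc children u).card :=
  Finset.card_pos.mpr ⟨u, pvMem_self_desc children u⟩

lemma pvHeightB_nonneg (children : List (List Int)) :
    ∀ (f : Nat) (v : Int), 0 ≤ pvHeightB children f v := by
  intro f
  induction f with
  | zero => intro v; simp [pvHeightB]
  | succ f ih =>
    intro v
    rw [pvHeightB]
    by_cases hk : pvKids children v = []
    · simp [hk]
    · simp only [hk, ite_false]
      rcases hm : (pvKids children v).map (fun c => pvHeightB children f c) with _ | ⟨a, t⟩
      · exact absurd (List.map_eq_nil_iff.mp hm) hk
      · rw [PySem.List.max?_id_cons, Option.getD_some]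
        have ha : 0 ≤ a := by
          have : a ∈ (pvKids children v).map (fun c => pvHeightB children f c) := by
            rw [hm]; exact List.mem_cons_self
          obtain ⟨c, _, hc⟩ := List.mem_map.mp this
          rw [← hc]; exact ih c
        have := (PySem.List.le_foldl_max t a).1
        omega

lemma pvHeightB_stable (children : List (List Int)) (root : Int)
    (hPre : Pre_subtree_height children root) :
    ∀ (f g : Nat) (v : Int), pvInR children.length v →
    pvNorm children.length v ∈ pvReach children root →
    (pvDesc children (pvNorm children.length v)).card ≤ f →
    (pvDesc children (pvNorm children.length v)).card ≤ g →
    pvHeightB children f v = pvHeightB children g v := by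
  intro f
  induction f with
  | zero =>
    intro g v _ _ hf _
    have := pvDesc_card_pos children (pvNorm children.length v)
    omega
  | succ f ih =>
    intro g v hv hr hf hg
    rcases g with _ | g
    · have := pvDesc_card_pos children (pvNorm children.length v)
      omega
    rw [pvHeightB, pvHeightB]
    by_cases hk : pvKids children v = []
    · simp [hk]
    · simp only [hk, ite_false]
      have hmap : (pvKids children v).map (fun c => pvHeightB children f c)
          = (pvKids children v).map (fun c => pvHeightB children g c) := by
        apply List.map_congr_left
        intro c hc
        obtain ⟨hc1, hc2, hc3⟩ := pvChild_facts children root hPre v hv hr c hc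
        exact ih g c hc1 hc2 (by omega) (by omega)
      rw [hmap]

lemma pvW_stable (children : List (List Int)) (root : Int)
    (hPre : Pre_subtree_height children root) :
    ∀ (f g : Nat) (v : Int), pvInR children.length v →
    pvNorm children.length v ∈ pvReach children root →
    (pvDesc children (pvNorm children.length v)).card ≤ f →
    (pvDesc children (pvNorm children.length v)).card ≤ g →
    pvW children f v = pvW children g v := by
  intro f
  induction f with
  | zero =>
    intro g v _ _ hf _
    have := pvDesc_card_pos children (pvNorm children.length v)
    omega
  | succ f ih =>
    intro g v hv hr hf hg
    rcases g with _ | g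
    · have := pvDesc_card_pos children (pvNorm children.length v)
      omega
    rw [pvW, pvW]
    have hmap : (pvKids children v).map (fun c => pvW children f c)
        = (pvKids children v).map (fun c => pvW children g c) := by
      apply List.map_congr_left
      intro c hc
      obtain ⟨hc1, hc2, hc3⟩ := pvChild_facts children root hPre v hv hr c hc
      exact ih g c hc1 hc2 (by omega) (by omega)
    rw [hmap]

lemma pvWB_rec (children : List (List Int)) (root : Int)
    (hPre : Pre_subtree_height children root) (v : Int)
    (hv : pvInR children.length v) (hr : pvNorm children.length v ∈ pvReach children root) :
    pvWB children v = 1 + ((pvKids children v).map (fun c => pvWB children c)).sum := by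
  have hn : 1 ≤ children.length := by obtain ⟨h1, h2⟩ := hv; omega
  obtain ⟨m, hm⟩ : ∃ m, children.length = m + 1 := ⟨children.length - 1, by omega⟩
  have hcard := pvDesc_card_le children root hPre _ hr
  have : pvW children children.length v = pvW children (m + 1) v := by rw [hm]
  rw [pvWB, this, pvW]
  congr 1
  congr 1
  apply List.map_congr_left
  intro c hc
  obtain ⟨hc1, hc2, hc3⟩ := pvChild_facts children root hPre v hv hr c hc
  have hccard := pvDesc_card_le children root hPre _ hc2
  exact pvW_stable children root hPre m children.length c hc1 hc2 (by omega) (by omega)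

lemma pvHB_rec (children : List (List Int)) (root : Int)
    (hPre : Pre_subtree_height children root) (v : Int)
    (hv : pvInR children.length v) (hr : pvNorm children.length v ∈ pvReach children root) :
    pvHB children v = if pvKids children v = [] then 0
      else 1 + ((PySem.List.max? ((pvKids children v).map (pvHB children)) (fun y => y)).getD 0) := by
  rw [pvHB, pvHeightB]
  by_cases hk : pvKids children v = []
  · simp [hk]
  · simp only [hk, ite_false]
    have hmap : (pvKids children v).map (fun c => pvHeightB children children.length c)
        = (pvKids children v).map (pvHB children) := by
      apply List.map_congr_left
      intro c hc
      obtain ⟨hc1, hc2, hc3⟩ := pvChild_facts children root hPre v hv hr c hc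
      have hcard := pvDesc_card_le children root hPre _ hc2
      have hvcard := pvDesc_card_le children root hPre _ hr
      exact pvHeightB_stable children root hPre children.length (children.length + 1) c hc1 hc2
        (by omega) (by omega)
    rw [hmap]

lemma pvW_pos (children : List (List Int)) : ∀ (f : Nat) (v : Int), 1 ≤ pvW children f v := by
  intro f v
  cases f with
  | zero => simp [pvW]
  | succ f => rw [pvW]; omega

-- pushing a fold of running maxima under an outer max
lemma foldmax_push (g : Int → Int) :
    ∀ (l : List Int) (a x : Int),
      l.foldl (fun m y => max m (g y)) (max a x) = max (l.foldl (fun m y => max m (g y)) a) x := by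
  intro l
  induction l with
  | nil => intro a x; rfl
  | cons h t ih =>
    intro a x
    simp only [List.foldl_cons]
    have : max (max a x) (g h) = max (max a (g h)) x := by
      rw [max_assoc, max_comm x (g h), ← max_assoc]
    rw [this, ih]

-- the fold of running maxima is reversal-invariant
lemma foldmax_reverse (g : Int → Int) :
    ∀ (l : List Int) (a : Int),
      l.reverse.foldl (fun m y => max m (g y)) a = l.foldl (fun m y => max m (g y)) a := by
  intro l
  induction l with
  | nil => intro a; rfl
  | cons h t ih =>
    intro a
    simp only [List.reverse_cons, List.foldl_append, List.foldl_cons, List.foldl_nil, ih]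
    rw [← foldmax_push g t a (g h)]

lemma foldmax_shift (children : List (List Int)) (d : Int) :
    ∀ (t : List Int) (md a : Int),
      t.foldl (fun m c => max m (d + 1 + pvHB children c)) (max md (d + 1 + a))
        = max md (d + 1 + (t.map (pvHB children)).foldl max a) := by
  intro t
  induction t with
  | nil => intro md a; rfl
  | cons c t ih =>
    intro md a
    simp only [List.foldl_cons, List.map_cons]
    have : max (max md (d + 1 + a)) (d + 1 + pvHB children c)
        = max md (d + 1 + max a (pvHB children c)) := by
      rw [max_assoc]
      congr 1
      omega
    rw [this, ih]

lemma pvLoopA_eq_pvG (children : List (List Int)) (root : Int)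
    (hPre : Pre_subtree_height children root) :
    ∀ (fuel : Nat) (stack : List (Int × Int)) (md : Int),
      (∀ p ∈ stack, pvInR children.length p.1 ∧
        pvNorm children.length p.1 ∈ pvReach children root) →
      pvSW children stack ≤ fuel →
      pvLoopA children fuel stack md = pvG children md stack := by
  intro fuel
  induction fuel with
  | zero =>
    intro stack md hv hf
    cases stack with
    | nil => rfl
    | cons p s =>
      exfalso
      have h1 : 1 ≤ pvWB children p.1 := pvW_pos children _ _
      have : pvWB children p.1 ≤ pvSW children (p :: s) := by
        simp [pvSW, List.map_cons, List.sum_cons]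
      omega
  | succ f ih =>
    intro stack md hv hf
    cases stack with
    | nil => rfl
    | cons p rest =>
      obtain ⟨v, d⟩ := p
      obtain ⟨h0, h1⟩ := hv (v, d) List.mem_cons_self
      rw [pvLoopA]
      have hWrec := pvWB_rec children root hPre v h0 h1
      have hswcons : pvSW children ((v, d) :: rest) = pvWB children v + pvSW children rest := by
        simp [pvSW, List.map_cons, List.sum_cons]
      have hswnew : pvSW children (((pvKids children v).map (fun c => (c, d + 1))).reverse ++ rest)
          = ((pvKids children v).map (fun c => pvWB children c)).sum + pvSW children rest := by
        simp only [pvSW, List.map_append, List.sum_append, List.map_reverse, List.sum_reverse,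
          List.map_map]
        rfl
      have hvnew : ∀ p ∈ ((pvKids children v).map (fun c => (c, d + 1))).reverse ++ rest,
          pvInR children.length p.1 ∧ pvNorm children.length p.1 ∈ pvReach children root := by
        intro q hq
        rcases List.mem_append.mp hq with hq | hq
        · rw [List.mem_reverse] at hq
          obtain ⟨c, hc, hcq⟩ := List.mem_map.mp hq
          obtain ⟨hc1, hc2, _⟩ := pvChild_facts children root hPre v h0 h1 c hc
          rw [← hcq]
          exact ⟨hc1, hc2⟩
        · exact hv q (List.mem_cons_of_mem _ hq)
      have hfnew : pvSW children (((pvKids children v).map (fun c => (c, d + 1))).reverse ++ rest) ≤ f := by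
        rw [hswnew]; rw [hswcons, hWrec] at hf; omega
      rw [ih _ _ hvnew hfnew]
      have hHrec := pvHB_rec children root hPre v h0 h1
      by_cases hk : pvKids children v = []
      · simp only [hk, List.map_nil, List.reverse_nil, List.nil_append, ite_true]
        simp only [pvG, List.foldl_cons]
        rw [hHrec, if_pos hk]
        congr 1
        omega
      · rcases hks : pvKids children v with _ | ⟨k, t⟩
        · exact absurd hks hk
        rw [if_neg (List.cons_ne_nil k t)]
        simp only [pvG, List.foldl_append, List.foldl_cons]
        rw [hHrec, if_neg hk, hks]
        congr 1
        have hrev : (((k :: t).map (fun c => (c, d + 1))).reverse).foldl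
              (fun m p => max m (p.2 + pvHB children p.1)) md
            = ((k :: t).map (fun c => (c, d + 1))).foldl
              (fun m p => max m (p.2 + pvHB children p.1)) md := by
          rw [← List.map_reverse]
          simp only [List.foldl_map]
          exact foldmax_reverse (fun c => d + 1 + pvHB children c) (k :: t) md
        rw [hrev]
        simp only [List.foldl_map, List.foldl_cons, List.map_cons]
        rw [PySem.List.max?_id_cons, Option.getD_some]
        rw [foldmax_shift children d t md (pvHB children k)]
        congr 1
        omega

-- ===== VERDICT (by name: the statement is the Claim_ definition above) =====
theorem subtree_height_spec : Claim_equal_subtree_height := by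
  intro children root _hdom hp
  unfold Spec_subtree_height subtree_height subtree_height_alt
  have hroot : pvInR children.length root := hp.1
  have hreach : pvNorm children.length root ∈ pvReach children root :=
    pvMem_self_desc children _
  rw [pvLoopA_eq_pvG children root hp (pvW children children.length root) [(root, 0)] 0
    (by intro p hpmem; simp at hpmem; rw [hpmem]; exact ⟨hroot, hreach⟩)
    (by simp [pvSW, pvWB])]
  simp only [pvG, List.foldl_cons, List.foldl_nil, zero_add]
  have hnn : 0 ≤ pvHB children root := pvHeightB_nonneg children _ root
  rw [max_eq_right hnn]
  rfl
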